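-- pv_equiv track=rewrite | github.com/SaarShai/Primes-Equispaced | experiments/D_vs_M_gap_check.py | cf_penultimate_denom
-- ===== SOURCE A (Python) =====
-- def cf_penultimate_denom(a, p):
--     """Get q_{m-1} (penultimate convergent denominator) for a/p."""
--     # CF expansion of a/p
--     nums = [a, p]
--     while nums[-1] != 0:
--         q, r = divmod(nums[-2], nums[-1])
--         nums.append(r)
--     # Convergents: use the standard recursion
--     h_prev, h_curr = 0, 1
--     k_prev, k_curr = 1, 0
--     x, y = a, p
--     while y != 0:
--         q = x // y
--         h_prev, h_curr = h_curr, q * h_curr + h_prev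
--         k_prev, k_curr = k_curr, q * k_curr + k_prev
--         x, y = y, x % y
--     # k_prev is q_{m-1} (penultimate denominator)
--     return k_prev
-- ===== SOURCE B (Python) =====
-- def cf_penultimate_denom(a, p):
--     """Get q_{m-1} (penultimate convergent denominator) for a/p."""
--     # Continued-fraction quotients of a/p by Euclidean division.
--     quots = []
--     x, y = a, p
--     while y != 0:
--         quots.append(x // y)
--         x, y = y, x % y
--     # 2x2 matrix formulation: M = M(q1)*...*M(qm) with M(q) = [[q,1],[1,0]]
--     # equals [[h_m, h_{m-1}],[k_m, k_{m-1}]], so the answer is the entry M[1][1].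
--     # Multiply the factors right-to-left.
--     m = (1, 0, 0, 1)
--     for q in reversed(quots):
--         a0, b0, c0, d0 = m
--         m = (q * a0 + c0, q * b0 + d0, a0, b0)
--     return m[3]
-- ===== Notes on version B (the rewrite author's own statement) =====
-- stated objective: alternative
-- what changed: B recasts the convergent recursion as a product of 2x2 matrices [[q,1],[1,0]] over the quotient list, multiplied right-to-left over the reversed list, and reads the penultimate denominator off as the bottom-right entry; A's dead remainder-list loop and fused four-scalar forward recurrence are gone.
import Mathlib
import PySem

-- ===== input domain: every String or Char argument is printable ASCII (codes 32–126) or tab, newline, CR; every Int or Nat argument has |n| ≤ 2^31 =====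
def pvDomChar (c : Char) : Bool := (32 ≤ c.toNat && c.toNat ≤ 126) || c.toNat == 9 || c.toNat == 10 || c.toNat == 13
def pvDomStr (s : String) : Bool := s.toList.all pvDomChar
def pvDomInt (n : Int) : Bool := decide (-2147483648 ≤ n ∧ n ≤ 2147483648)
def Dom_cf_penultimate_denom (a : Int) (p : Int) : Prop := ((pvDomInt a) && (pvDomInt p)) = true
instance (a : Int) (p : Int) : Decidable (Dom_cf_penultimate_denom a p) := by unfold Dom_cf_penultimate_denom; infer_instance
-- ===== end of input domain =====

-- B replaces A's fused scalar convergent recursion (plus its dead remainder-list loop) by a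
-- right-to-left 2x2 matrix product over the continued-fraction quotients.

-- termination measure for the Euclidean loops: |x % y| < |y| for y ≠ 0
theorem pvModAbsLt (x y : Int) (hy : y ≠ 0) :
    (PySem.Int.mod x y).natAbs < y.natAbs := by
  rcases lt_or_gt_of_ne hy with h | h
  · have := PySem.Int.mod_neg_bounds x h
    omega
  · have h1 := PySem.Int.mod_nonneg x h
    have h2 := PySem.Int.mod_lt x h
    omega

-- ===== PORT A =====
-- first while loop of A: builds (and discards) the list of remainders
def cfNums (x y : Int) (acc : List Int) : List Int :=
  if hy : y = 0 then acc
  else cfNums y (PySem.Int.mod x y) (acc ++ [PySem.Int.mod x y])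
termination_by y.natAbs
decreasing_by exact pvModAbsLt x y hy

-- second while loop of A: fused convergent recursion
def cfLoop (x y hp hc kp kc : Int) : Int :=
  if hy : y = 0 then kp
  else
    let q := PySem.Int.floordiv x y
    cfLoop y (PySem.Int.mod x y) hc (q * hc + hp) kc (q * kc + kp)
termination_by y.natAbs
decreasing_by exact pvModAbsLt x y hy

def cf_penultimate_denom (a : Int) (p : Int) : Int :=
  let _nums := cfNums a p [a, p]
  cfLoop a p 0 1 1 0

-- ===== PORT B =====
-- pass 1: continued-fraction quotients of a/p
def cfQuots (x y : Int) : List Int :=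
  if hy : y = 0 then []
  else PySem.Int.floordiv x y :: cfQuots y (PySem.Int.mod x y)
termination_by y.natAbs
decreasing_by exact pvModAbsLt x y hy

-- 2x2 integer matrix (a, b, c, d) = [[a,b],[c,d]]
def cfMul (A B : Int × Int × Int × Int) : Int × Int × Int × Int :=
  (A.1 * B.1 + A.2.1 * B.2.2.1, A.1 * B.2.1 + A.2.1 * B.2.2.2,
   A.2.2.1 * B.1 + A.2.2.2 * B.2.2.1, A.2.2.1 * B.2.1 + A.2.2.2 * B.2.2.2)

-- left-multiply M(q) = [[q,1],[1,0]] for q running over the reversed quotient list;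
-- the answer is the bottom-right entry of the full product
def cf_penultimate_denom_alt (a : Int) (p : Int) : Int :=
  ((cfQuots a p).reverse.foldl (fun M q => cfMul (q, 1, 1, 0) M) (1, 0, 0, 1)).2.2.2

-- ===== PRECONDITION & SPEC =====
def Spec_cf_penultimate_denom (a : Int) (p : Int) (out : Int) : Prop := out = cf_penultimate_denom_alt a p
instance (a : Int) (p : Int) (out : Int) : Decidable (Spec_cf_penultimate_denom a p out) := by unfold Spec_cf_penultimate_denom; infer_instance

-- ===== CLAIM (what is proved, stated in full; the proofs are below) =====
def Claim_equal_cf_penultimate_denom : Prop := ∀ (a : Int) (p : Int), Dom_cf_penultimate_denom a p → Spec_cf_penultimate_denom a p (cf_penultimate_denom a p)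

-- ===== LEMMAS AND PROOFS =====
theorem cfMul_assoc (A B C : Int × Int × Int × Int) :
    cfMul (cfMul A B) C = cfMul A (cfMul B C) := by
  obtain ⟨a, b, c, d⟩ := A; obtain ⟨e, f, g, h⟩ := B; obtain ⟨i, j, k, l⟩ := C
  simp only [cfMul, Prod.mk.injEq]
  refine ⟨by ring, by ring, by ring, by ring⟩

theorem cfMul_one (A : Int × Int × Int × Int) : cfMul A (1, 0, 0, 1) = A := by
  obtain ⟨a, b, c, d⟩ := A
  simp [cfMul]

-- the forward foldl of right-multiplications equals init times B's foldr-shaped product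
theorem foldl_cfMul_eq (l : List Int) (init : Int × Int × Int × Int) :
    l.foldl (fun M q => cfMul M (q, 1, 1, 0)) init
      = cfMul init (l.foldr (fun q M => cfMul (q, 1, 1, 0) M) (1, 0, 0, 1)) := by
  induction l generalizing init with
  | nil => simp [cfMul_one]
  | cons q l ih => simp [List.foldl_cons, List.foldr_cons, ih, cfMul_assoc]

-- A's fused loop is the forward matrix product, started at [[hc,hp],[kc,kp]]
theorem cfLoop_eq_foldl (x y hp hc kp kc : Int) :
    cfLoop x y hp hc kp kc =
      ((cfQuots x y).foldl (fun M q => cfMul M (q, 1, 1, 0)) (hc, hp, kc, kp)).2.2.2 := by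
  fun_induction cfLoop x y hp hc kp kc with
  | case1 => simp_all [cfQuots]
  | case2 =>
      rename_i x y hp hc kp kc hy q ih
      rw [cfQuots, dif_neg hy, List.foldl_cons, ih]
      have h : cfMul (hc, hp, kc, kp) (PySem.Int.floordiv x y, 1, 1, 0)
          = (q * hc + hp, hc, q * kc + kp, kc) := by
        simp only [cfMul, Prod.mk.injEq, q]
        refine ⟨by ring, by ring, by ring, by ring⟩
      rw [h]

-- ===== VERDICT (by name: the statement is the Claim_ definition above) =====
theorem cf_penultimate_denom_spec : Claim_equal_cf_penultimate_denom := by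
  intro a p _
  unfold Spec_cf_penultimate_denom cf_penultimate_denom cf_penultimate_denom_alt
  rw [List.foldl_reverse, cfLoop_eq_foldl a p 0 1 1 0, foldl_cfMul_eq]
  simp [cfMul]
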